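-- pv_equiv track=rewrite | github.com/dvddz007/Python | 2025/Novembre 2025/griglia.py | colonneRighePari1
-- ===== SOURCE A (Python) =====
-- def colonneRighePari1(row, col) -> list[list[int]]:
--     matrice = []
--     for r in range(row):
--         lista = []
--         if r % 2 == 0:
--             matrice.append([1] * col)
--         for c in range(col):
--             lista.append(1)
--     return matrice
-- ===== SOURCE B (Python) =====
-- def colonneRighePari1(row, col) -> list[list[int]]:
--     return [[1] * col for _ in range((row + 1) // 2)]
-- ===== Notes on version B (the rewrite author's own statement) =====
-- stated objective: simpler
-- what changed: Replaces the scan over all row indices with a parity test (plus a dead inner loop that builds and discards a list per row) by a closed-form count of even rows (row+1)//2 and a single comprehension building that many fresh rows.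
import Mathlib
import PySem

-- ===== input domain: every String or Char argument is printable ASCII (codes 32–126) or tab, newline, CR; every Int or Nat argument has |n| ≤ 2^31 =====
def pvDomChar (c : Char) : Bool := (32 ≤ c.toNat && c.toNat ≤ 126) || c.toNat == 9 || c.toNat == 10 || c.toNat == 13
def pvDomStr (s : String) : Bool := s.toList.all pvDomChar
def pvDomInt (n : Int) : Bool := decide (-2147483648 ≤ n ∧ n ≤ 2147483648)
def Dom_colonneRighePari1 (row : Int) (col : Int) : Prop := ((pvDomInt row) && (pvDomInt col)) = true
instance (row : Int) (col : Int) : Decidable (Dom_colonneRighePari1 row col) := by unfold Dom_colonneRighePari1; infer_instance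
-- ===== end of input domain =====

-- ===== PORT A =====
-- Literal port of A: scan r in range(row); on even r append [1]*col; build (and discard) lista.
def colonneRighePari1 (row : Int) (col : Int) : List (List Int) :=
  (PySem.List.pyRange 0 row 1).foldl
    (fun matrice r =>
      let _lista : List Int := (PySem.List.pyRange 0 col 1).foldl (fun l _ => l ++ [1]) []
      if PySem.Int.mod r 2 == 0 then matrice ++ [PySem.List.pyRepeat [1] col] else matrice)
    []

-- ===== PORT B =====
-- Port of B: (row+1)//2 fresh rows of [1]*col.
def colonneRighePari1_alt (row : Int) (col : Int) : List (List Int) :=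
  (PySem.List.pyRange 0 (PySem.Int.floordiv (row + 1) 2) 1).map (fun _ => PySem.List.pyRepeat [1] col)

-- ===== PRECONDITION & SPEC =====
def Spec_colonneRighePari1 (row : Int) (col : Int) (out : List (List Int)) : Prop := out = colonneRighePari1_alt row col
instance (row : Int) (col : Int) (out : List (List Int)) : Decidable (Spec_colonneRighePari1 row col out) := by unfold Spec_colonneRighePari1; infer_instance

-- ===== CLAIM (what is proved, stated in full; the proofs are below) =====
def Claim_equal_colonneRighePari1 : Prop := ∀ (row : Int) (col : Int), Dom_colonneRighePari1 row col → Spec_colonneRighePari1 row col (colonneRighePari1 row col)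

-- ===== LEMMAS AND PROOFS =====

-- the loop of port A, on natural row counts
lemma loop_nat (col : Int) : ∀ n : Nat,
    (PySem.List.pyRange 0 (n : Int) 1).foldl
      (fun (matrice : List (List Int)) r => if PySem.Int.mod r 2 == 0 then matrice ++ [PySem.List.pyRepeat [1] col] else matrice)
      [] = List.replicate ((n + 1) / 2) (PySem.List.pyRepeat [1] col) := by
  intro n
  induction n with
  | zero => simp [PySem.List.pyRange_one_eq_nil]
  | succ n ih =>
      have h : ((n + 1 : Nat) : Int) = (n : Int) + 1 := by push_cast; ring
      rw [h, PySem.List.pyRange_one_succ_right (by positivity), List.foldl_append, ih]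
      rw [List.foldl_cons, List.foldl_nil]
      have hm : PySem.Int.mod ((n : Nat) : Int) 2 = ((n % 2 : Nat) : Int) := PySem.Int.mod_natCast n 2
      by_cases he : n % 2 = 0
      · have h2 : (n + 1 + 1) / 2 = (n + 1) / 2 + 1 := by omega
        simp [h2, List.replicate_succ']
        omega
      · have h1 : n % 2 = 1 := by omega
        have h2 : (n + 1 + 1) / 2 = (n + 1) / 2 := by omega
        simp [h2]
        omega

lemma A_nat (col : Int) (n : Nat) : colonneRighePari1 (n : Int) col =
    List.replicate ((n + 1) / 2) (PySem.List.pyRepeat [1] col) := by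
  unfold colonneRighePari1
  exact loop_nat col n

lemma alt_eq (row col : Int) : colonneRighePari1_alt row col =
    List.replicate (PySem.Int.floordiv (row + 1) 2).toNat (PySem.List.pyRepeat [1] col) := by
  rw [colonneRighePari1_alt, List.map_const']
  simp [PySem.List.length_pyRange_one]

-- ===== VERDICT (by name: the statement is the Claim_ definition above) =====
theorem colonneRighePari1_spec : Claim_equal_colonneRighePari1 := by
  intro row col _
  unfold Spec_colonneRighePari1
  by_cases h : 0 ≤ row
  · obtain ⟨n, rfl⟩ : ∃ n : Nat, row = (n : Int) := ⟨row.toNat, (Int.toNat_of_nonneg h).symm⟩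
    rw [A_nat, alt_eq]
    have hc : (PySem.Int.floordiv ((n : Int) + 1) 2).toNat = (n + 1) / 2 := by
      rw [PySem.Int.floordiv_eq_ediv_of_pos (a := (n : Int) + 1) (b := 2) (by norm_num)]
      omega
    rw [hc]
  · rw [not_le] at h
    have hA : colonneRighePari1 row col = [] := by
      unfold colonneRighePari1
      rw [PySem.List.pyRange_one_eq_nil (a := 0) (b := row) (by omega)]
      rfl
    have hd : PySem.Int.floordiv (row + 1) 2 ≤ 0 := by
      rw [PySem.Int.floordiv_eq_ediv_of_pos (a := row + 1) (b := 2) (by norm_num)]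
      omega
    rw [hA, alt_eq, Int.toNat_of_nonpos hd]
    rfl
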